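-- pv_equiv track=rewrite | github.com/brian-cobo/Stock_Market_Analysis_Software | Federal_Reserve/FederalReserve.py | __sort_ngram_files
-- ===== SOURCE A (Python) =====
-- def __sort_ngram_files(ngramFiles):
--     sorted_n = {}
--     for file in ngramFiles:
--         n = file.split('=')[1]
--         n = n.split('.')[0]
--         if n not in sorted_n:
--             sorted_n[n] = [file]
--         else:
--             sorted_n[n].append(file)
--     return sorted_n
-- ===== SOURCE B (Python) =====
-- def __sort_ngram_files(ngramFiles):
--     # Two-pass grouping: extract all keys once, take first-seen distinct keys,
--     # then build each group by filtering the input against its key.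
--     ks = [f.split('=')[1].split('.')[0] for f in ngramFiles]
--     order = dict.fromkeys(ks)
--     return {k: [f for f, kf in zip(ngramFiles, ks) if kf == k] for k in order}
-- ===== Notes on version B (the rewrite author's own statement) =====
-- stated objective: alternative
-- what changed: Replaces the single-pass incremental dict-append grouping with a two-pass strategy: compute every key once, take the first-seen distinct keys with dict.fromkeys, and build each group by a per-key filter over the zipped input.
import Mathlib
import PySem

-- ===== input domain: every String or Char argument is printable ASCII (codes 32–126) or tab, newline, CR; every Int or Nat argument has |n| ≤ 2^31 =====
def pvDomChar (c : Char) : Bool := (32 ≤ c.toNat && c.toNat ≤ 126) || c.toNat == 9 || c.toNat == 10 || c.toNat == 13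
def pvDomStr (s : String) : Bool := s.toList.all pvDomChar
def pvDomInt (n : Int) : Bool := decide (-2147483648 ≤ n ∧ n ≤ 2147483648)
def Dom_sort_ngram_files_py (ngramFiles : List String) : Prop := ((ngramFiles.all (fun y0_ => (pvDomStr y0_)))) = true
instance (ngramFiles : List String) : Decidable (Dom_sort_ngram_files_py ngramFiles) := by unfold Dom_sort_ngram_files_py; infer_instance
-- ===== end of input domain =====

-- B groups by first-seen distinct keys with a per-key filter instead of A's incremental
-- dict-append loop; same result, a different (alternative, not faster) decomposition.

-- ===== PORT A =====
-- key extraction shared verbatim by both Pythons: file.split('=')[1].split('.')[0]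
-- (the .getD fallbacks are unreachable under Pre_, which excludes the IndexError inputs)
def pvKey (f : String) : String :=
  let n := (PySem.List.pyGet? ((PySem.Str.split? f "=").getD []) 1).getD ""
  (PySem.List.pyGet? ((PySem.Str.split? n ".").getD []) 0).getD ""

def sort_ngram_files_py (ngramFiles : List String) : List (String × List String) :=
  (ngramFiles.foldl (fun d file =>
      let n := pvKey file
      if d.contains n = false then d.insert n [file]
      else d.modify n [] (· ++ [file]))
    (PySem.Dict.empty : PySem.Dict String (List String))).items

-- ===== PORT B =====
def sort_ngram_files_py_alt (ngramFiles : List String) : List (String × List String) :=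
  let ks := ngramFiles.map pvKey
  (PySem.List.dedup ks).map (fun k =>
    (k, ((ngramFiles.zip ks).filter (fun p => p.2 == k)).map (·.1)))

-- ===== PRECONDITION & SPEC =====
-- Pre_ excludes exactly the inputs containing a filename without '=', on which
-- A's file.split('=')[1] raises IndexError.
def Pre_sort_ngram_files_py (ngramFiles : List String) : Prop :=
  ∀ f ∈ ngramFiles, 2 ≤ ((PySem.Str.split? f "=").getD []).length
instance (ngramFiles : List String) : Decidable (Pre_sort_ngram_files_py ngramFiles) := by
  unfold Pre_sort_ngram_files_py; infer_instance

def pvWitness_sort_ngram_files_py : List String :=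
  ["ngram=2.csv", "ngram=3.csv", "other=2.txt"]

def Spec_sort_ngram_files_py (ngramFiles : List String) (out : List (String × List String)) : Prop := out = sort_ngram_files_py_alt ngramFiles
instance (ngramFiles : List String) (out : List (String × List String)) : Decidable (Spec_sort_ngram_files_py ngramFiles out) := by unfold Spec_sort_ngram_files_py; infer_instance

-- ===== CLAIM (what is proved, stated in full; the proofs are below) =====
def Claim_equal_sort_ngram_files_py : Prop := ∀ (ngramFiles : List String), Dom_sort_ngram_files_py ngramFiles → Pre_sort_ngram_files_py ngramFiles → Spec_sort_ngram_files_py ngramFiles (sort_ngram_files_py ngramFiles)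

-- ===== LEMMAS AND PROOFS =====

-- A's if/else step is exactly one Dict.modify with default []
lemma pv_step_eq (d : PySem.Dict String (List String)) (file : String) :
    (if d.contains (pvKey file) = false then d.insert (pvKey file) [file]
     else d.modify (pvKey file) [] (· ++ [file]))
    = d.modify (pvKey file) [] (· ++ [file]) := by
  by_cases h : d.contains (pvKey file) = false
  · rw [if_pos h, PySem.Dict.modify, PySem.Dict.getD_of_not_contains d [] h, List.nil_append]
  · simp [h]

lemma pv_fold_eq (l : List String) (d : PySem.Dict String (List String)) :
    l.foldl (fun d file =>
      if d.contains (pvKey file) = false then d.insert (pvKey file) [file]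
      else d.modify (pvKey file) [] (· ++ [file])) d
    = l.foldl (fun d file => d.modify (pvKey file) [] (· ++ [file])) d := by
  induction l generalizing d with
  | nil => rfl
  | cons x xs ih =>
    rw [List.foldl_cons, List.foldl_cons, pv_step_eq]; exact ih _

lemma pv_zip_map (l : List String) :
    l.zip (l.map pvKey) = l.map (fun f => (f, pvKey f)) := by
  induction l with
  | nil => rfl
  | cons x xs ih => simp [ih]

theorem pv_main (l : List String) : sort_ngram_files_py l = sort_ngram_files_py_alt l := by
  unfold sort_ngram_files_py sort_ngram_files_py_alt
  rw [pv_fold_eq]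
  set d := l.foldl (fun d file => d.modify (pvKey file) [] (· ++ [file]))
      (PySem.Dict.empty : PySem.Dict String (List String)) with hd
  have hnd : d.keys.Nodup := by
    rw [hd]
    exact PySem.Dict.nodup_keys_foldl_modify_key l pvKey [] (fun _ x => (· ++ [x])) _
      (by simp [PySem.Dict.keys_empty])
  have hkeys : d.keys = PySem.Set.ofList (l.map pvKey) := by
    rw [hd, PySem.Dict.keys_foldl_modify_key, PySem.Dict.keys_empty,
      PySem.Set.update_nil_left]
  have hget : ∀ k, d.getD k [] = (l.filter (fun f => pvKey f == k)) := by
    intro k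
    have : d = (l.map (fun f => (pvKey f, f))).foldl
        (fun d p => d.modify p.1 [] (· ++ [p.2])) PySem.Dict.empty := by
      rw [hd, List.foldl_map]
    rw [this, PySem.Dict.getD_foldl_modify_append, PySem.Dict.getD_empty,
      List.nil_append, List.filter_map, List.map_map]
    simp [Function.comp_def]
  rw [PySem.Dict.items_eq_map_keys d hnd [], hkeys]
  simp only [PySem.List.dedup_eq_ofList, pv_zip_map]
  apply List.map_congr_left
  intro k _
  rw [hget k, List.filter_map, List.map_map]
  simp [Function.comp_def]

-- ===== VERDICT (by name: the statement is the Claim_ definition above) =====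
theorem sort_ngram_files_py_spec : Claim_equal_sort_ngram_files_py := by
  intro l _ _
  unfold Spec_sort_ngram_files_py
  exact pv_main l
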